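-- pv_equiv track=rewrite | github.com/tleonardi/ORF_annotate | orf_annotate/orf_annotate.py | choose_longest_orf
-- ===== SOURCE A (Python) =====
-- def choose_first_orf(orfs):
--     """ Returns the first ORF from a dict of ORFs
--     Args:
--         orfs (dict): ORFs dict indexed by (int) ORF start coordinate
--     Returns:
--         dict:   value of orfs at first key or None if orfs is empty
--     """
--     if(len(orfs)==0):
--         return None
--     min_key = min([k for k in orfs.keys()])
--     return(orfs[min_key])
--
-- def choose_longest_orf(orfs):
--     """ Returns the longest ORF from a dict of ORFs.
--     In case of a tie, the first one (i.e. lowest index) is returned.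
--     Args:
--         orfs (dict): ORFs dict of dicts indexed by (int) ORF start coordinate
--                      and containing a len key.
--     Returns:
--         dict:   value of longest entry of orfs or None if orfs is empty
--     """
--     if(len(orfs)==0):
--         return None
--     max_length = max([v["len"] for v in orfs.values()])
--     longest_orfs = {k:v for k,v in orfs.items() if v["len"]==max_length}
--     if(len(longest_orfs)>1):
--         return choose_first_orf(longest_orfs)
--     else:
--         return longest_orfs.popitem()[1]
-- ===== SOURCE B (Python) =====
-- def choose_longest_orf(orfs):
--     if len(orfs) == 0:
--         return None
--     return min(orfs.items(), key=lambda kv: (-kv[1]["len"], kv[0]))[1]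
-- ===== Notes on version B (the rewrite author's own statement) =====
-- stated objective: simpler
-- what changed: Replaces the three-stage max-length scan + dict-comprehension filter + choose_first_orf(min key) with a single min() pass over orfs.items() using the composite key (-len, start), which selects the longest ORF and breaks ties toward the lowest start coordinate in one scan.
import Mathlib
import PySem

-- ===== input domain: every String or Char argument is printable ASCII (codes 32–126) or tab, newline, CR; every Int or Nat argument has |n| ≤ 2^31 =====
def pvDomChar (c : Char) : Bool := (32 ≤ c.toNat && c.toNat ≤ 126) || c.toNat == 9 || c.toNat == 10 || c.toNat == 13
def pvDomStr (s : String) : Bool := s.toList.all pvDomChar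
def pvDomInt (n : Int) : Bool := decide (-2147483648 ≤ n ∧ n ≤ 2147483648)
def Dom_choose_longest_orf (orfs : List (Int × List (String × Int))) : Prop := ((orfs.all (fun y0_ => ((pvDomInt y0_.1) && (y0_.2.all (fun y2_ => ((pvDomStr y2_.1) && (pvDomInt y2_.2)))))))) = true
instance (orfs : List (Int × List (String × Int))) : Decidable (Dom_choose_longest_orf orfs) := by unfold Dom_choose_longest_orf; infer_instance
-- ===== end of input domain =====

-- B replaces A's three-stage max-length scan, filter and min-key pick by a single
-- min() pass with the composite key (-len, start); objective: simpler.

-- ===== PORT A =====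
-- v["len"] (first-match lookup; Pre_ guarantees the key is present, so the getD default is never used)
def pvLenOf (v : List (String × Int)) : Int := (List.lookup "len" v).getD 0

def choose_first_orf (orfs : List (Int × List (String × Int))) : Option (List (String × Int)) :=
  if orfs.length = 0 then none
  else
    match PySem.List.min? (orfs.map (fun kv => kv.1)) (fun k => k) with
    | none => none                        -- unreachable: orfs nonempty
    | some min_key => List.lookup min_key orfs

def choose_longest_orf (orfs : List (Int × List (String × Int))) : Option (List (String × Int)) :=
  if orfs.length = 0 then none
  else
    match PySem.List.max? (orfs.map (fun kv => pvLenOf kv.2)) (fun v => v) with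
    | none => none                        -- unreachable: orfs nonempty
    | some max_length =>
      let longest_orfs := orfs.filter (fun kv => pvLenOf kv.2 == max_length)
      if 1 < longest_orfs.length then choose_first_orf longest_orfs
      else (longest_orfs.getLast?).map (fun kv => kv.2)   -- popitem() pops the last item

-- ===== PORT B =====
def choose_longest_orf_alt (orfs : List (Int × List (String × Int))) : Option (List (String × Int)) :=
  if orfs.isEmpty then none
  else (PySem.List.min2? orfs (fun kv => -(pvLenOf kv.2)) (fun kv => kv.1)).map (fun kv => kv.2)

-- ===== PRECONDITION & SPEC =====
-- Pre_ excludes inputs where some ORF value lacks the "len" key: there Python A (and B) raise KeyError.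
def Pre_choose_longest_orf (orfs : List (Int × List (String × Int))) : Prop :=
  ∀ kv ∈ orfs, (List.lookup "len" kv.2).isSome = true
instance (orfs : List (Int × List (String × Int))) : Decidable (Pre_choose_longest_orf orfs) := by
  unfold Pre_choose_longest_orf; infer_instance

def pvWitness_choose_longest_orf : (List (Int × List (String × Int))) :=
  [(3, [("len", 5)]), (1, [("len", 5)])]

def Spec_choose_longest_orf (orfs : List (Int × List (String × Int))) (out : Option (List (String × Int))) : Prop := out = choose_longest_orf_alt orfs
instance (orfs : List (Int × List (String × Int))) (out : Option (List (String × Int))) : Decidable (Spec_choose_longest_orf orfs out) := by unfold Spec_choose_longest_orf; infer_instance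

-- ===== CLAIM (what is proved, stated in full; the proofs are below) =====
def Claim_equal_choose_longest_orf : Prop := ∀ (orfs : List (Int × List (String × Int))), Dom_choose_longest_orf orfs → Pre_choose_longest_orf orfs → Spec_choose_longest_orf orfs (choose_longest_orf orfs)

-- ===== LEMMAS AND PROOFS =====

-- lexicographic strict order on the composite key (k1, k2)
def pvLexlt {α : Type} (k1 k2 : α → Int) (a b : α) : Prop :=
  k1 a < k1 b ∨ (k1 a = k1 b ∧ k2 a < k2 b)

def pvStep {α : Type} (k1 k2 : α → Int) (acc : Option α) (x : α) : Option α :=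
  match acc with
  | none => some x
  | some m => if (decide (k1 x < k1 m) || !decide (k1 m < k1 x) && decide (k2 x < k2 m)) then some x else some m

theorem pvMin2_eq_foldl {α : Type} (k1 k2 : α → Int) (xs : List α) :
    PySem.List.min2? xs k1 k2 = List.foldl (pvStep k1 k2) none xs := rfl

theorem pvStep_some_pos {α : Type} (k1 k2 : α → Int) (c x : α) (h : pvLexlt k1 k2 x c) :
    pvStep k1 k2 (some c) x = some x := by
  unfold pvStep
  simp only [pvLexlt] at h
  have : (decide (k1 x < k1 c) || !decide (k1 c < k1 x) && decide (k2 x < k2 c)) = true := by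
    simp only [Bool.or_eq_true, Bool.and_eq_true, Bool.not_eq_true', decide_eq_true_eq,
      decide_eq_false_iff_not]
    omega
  simp [this]

theorem pvStep_some_neg {α : Type} (k1 k2 : α → Int) (c x : α) (h : ¬ pvLexlt k1 k2 x c) :
    pvStep k1 k2 (some c) x = some c := by
  unfold pvStep
  simp only [pvLexlt] at h
  have : (decide (k1 x < k1 c) || !decide (k1 c < k1 x) && decide (k2 x < k2 c)) = false := by
    simp only [Bool.or_eq_false_iff, Bool.and_eq_false_iff, Bool.not_eq_false',
      decide_eq_true_eq, decide_eq_false_iff_not]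
    omega
  simp [this]

theorem pvFoldl_some_isSome {α : Type} (k1 k2 : α → Int) :
    ∀ (t : List α) (c : α), (List.foldl (pvStep k1 k2) (some c) t).isSome = true := by
  intro t
  induction t with
  | nil => intro c; rfl
  | cons x t ih =>
    intro c
    rw [List.foldl_cons]
    by_cases h : pvLexlt k1 k2 x c
    · rw [pvStep_some_pos k1 k2 c x h]; exact ih x
    · rw [pvStep_some_neg k1 k2 c x h]; exact ih c

theorem pvFoldl_char {α : Type} (k1 k2 : α → Int) :
    ∀ (t : List α) (c m : α),
      List.foldl (pvStep k1 k2) (some c) t = some m →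
      (m = c ∧ ∀ y ∈ t, ¬ pvLexlt k1 k2 y m) ∨
      (∃ l r, t = l ++ m :: r ∧ pvLexlt k1 k2 m c ∧
        (∀ y ∈ l, pvLexlt k1 k2 m y) ∧ (∀ y ∈ r, ¬ pvLexlt k1 k2 y m)) := by
  intro t
  induction t with
  | nil => intro c m h; left; exact ⟨(Option.some.injEq _ _ ▸ h).symm ▸ rfl, by simp⟩
  | cons x t ih =>
    intro c m h
    rw [List.foldl_cons] at h
    by_cases hxc : pvLexlt k1 k2 x c
    · rw [pvStep_some_pos k1 k2 c x hxc] at h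
      rcases ih x m h with ⟨rfl, hall⟩ | ⟨l, r, rfl, hmx, hl, hr⟩
      · right
        exact ⟨[], t, rfl, hxc, by simp, hall⟩
      · right
        refine ⟨x :: l, r, rfl, ?_, ?_, hr⟩
        · unfold pvLexlt at hmx hxc ⊢; omega
        · intro y hy
          rcases List.mem_cons.1 hy with rfl | hy
          · exact hmx
          · exact hl y hy
    · rw [pvStep_some_neg k1 k2 c x hxc] at h
      rcases ih c m h with ⟨rfl, hall⟩ | ⟨l, r, rfl, hmc, hl, hr⟩
      · left
        refine ⟨rfl, ?_⟩
        intro y hy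
        rcases List.mem_cons.1 hy with rfl | hy
        · exact hxc
        · exact hall y hy
      · right
        refine ⟨x :: l, r, rfl, hmc, ?_, hr⟩
        intro y hy
        rcases List.mem_cons.1 hy with rfl | hy
        · unfold pvLexlt at hmc hxc ⊢; omega
        · exact hl y hy

theorem pvMin2_char {α : Type} (k1 k2 : α → Int) (x : α) (t : List α) (m : α)
    (h : PySem.List.min2? (x :: t) k1 k2 = some m) :
    ∃ l r, x :: t = l ++ m :: r ∧ (∀ y ∈ l, pvLexlt k1 k2 m y) ∧
      (∀ y ∈ r, ¬ pvLexlt k1 k2 y m) := by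
  rw [pvMin2_eq_foldl, List.foldl_cons] at h
  have h' : List.foldl (pvStep k1 k2) (some x) t = some m := h
  rcases pvFoldl_char k1 k2 t x m h' with ⟨rfl, hall⟩ | ⟨l, r, rfl, hmx, hl, hr⟩
  · exact ⟨[], t, rfl, by simp, hall⟩
  · refine ⟨x :: l, r, rfl, ?_, hr⟩
    intro y hy
    rcases List.mem_cons.1 hy with rfl | hy
    · exact hmx
    · exact hl y hy

theorem pvMin2_isSome {α : Type} (k1 k2 : α → Int) (x : α) (t : List α) :
    (PySem.List.min2? (x :: t) k1 k2).isSome = true := by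
  rw [pvMin2_eq_foldl, List.foldl_cons]
  exact pvFoldl_some_isSome k1 k2 t x

-- lookup skips a prefix with no matching key
theorem pvLookup_append {κ ν : Type} [BEq κ] (k : κ) (l₁ l₂ : List (κ × ν))
    (h : ∀ p ∈ l₁, (k == p.1) = false) :
    List.lookup k (l₁ ++ l₂) = List.lookup k l₂ := by
  induction l₁ with
  | nil => rfl
  | cons p t ih =>
    rw [List.cons_append, List.lookup]
    rw [h p (by simp)]
    exact ih (fun q hq => h q (by simp [hq]))

-- the central fact: the two ports agree on every input
theorem pv_ports_agree (orfs : List (Int × List (String × Int))) :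
    choose_longest_orf orfs = choose_longest_orf_alt orfs := by
  cases orfs with
  | nil => rfl
  | cons x t =>
    unfold choose_longest_orf choose_longest_orf_alt
    simp only [List.length_cons, List.isEmpty_cons, if_neg (by omega : ¬ (t.length + 1 = 0))]
    -- B side: min2? is some m with the characterisation
    obtain ⟨m, hm⟩ := Option.isSome_iff_exists.1
      (pvMin2_isSome (fun kv => -(pvLenOf kv.2)) (fun kv : Int × List (String × Int) => kv.1) x t)
    obtain ⟨l, r, heq, hl, hr⟩ := pvMin2_char _ _ _ _ _ hm
    -- minimality of m over the whole list
    have hmin : ∀ y ∈ x :: t, ¬ pvLexlt (fun kv => -(pvLenOf kv.2)) (fun kv : Int × List (String × Int) => kv.1) y m := by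
      intro y hy
      rw [heq] at hy
      rcases List.mem_append.1 hy with hy | hy
      · have := hl y hy
        unfold pvLexlt at this ⊢; omega
      · rcases List.mem_cons.1 hy with rfl | hy
        · unfold pvLexlt; omega
        · exact hr y hy
    have hmmem : m ∈ x :: t := by rw [heq]; exact List.mem_append.2 (Or.inr (by simp))
    -- A side: max_length
    have hne : (x :: t).map (fun kv => pvLenOf kv.2) ≠ [] := by simp
    have hsomeM : (PySem.List.max? ((x :: t).map (fun kv => pvLenOf kv.2)) (fun v => v)).isSome = true := by
      cases hmax : PySem.List.max? ((x :: t).map (fun kv => pvLenOf kv.2)) (fun v => v) with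
      | none => exact absurd ((PySem.List.max?_eq_none_iff _ _).1 hmax) hne
      | some v => rfl
    obtain ⟨M, hM⟩ := Option.isSome_iff_exists.1 hsomeM
    rw [hM]
    have hMmax : ∀ y ∈ x :: t, pvLenOf y.2 ≤ M := by
      intro y hy
      exact PySem.List.max?_isMax hM _ (List.mem_map.2 ⟨y, hy, rfl⟩)
    have hMmem : ∃ w ∈ x :: t, pvLenOf w.2 = M := by
      obtain ⟨w, hw, hwe⟩ := List.mem_map.1 (PySem.List.max?_mem hM)
      exact ⟨w, hw, hwe⟩
    -- len m = M
    have hmM : pvLenOf m.2 = M := by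
      obtain ⟨w, hw, hwM⟩ := hMmem
      have h1 := hmin w hw
      have h2 := hMmax m hmmem
      simp only [pvLexlt] at h1; omega
    -- the filtered list
    have hfil : (x :: t).filter (fun kv => pvLenOf kv.2 == M) =
        (l.filter (fun kv => pvLenOf kv.2 == M)) ++ m :: (r.filter (fun kv => pvLenOf kv.2 == M)) := by
      rw [heq, List.filter_append, List.filter_cons, if_pos (by simpa using hmM)]
    rw [hm]
    simp only [Option.map_some, Bool.false_eq_true, if_false]
    rw [hfil]
    set lf := l.filter (fun kv => pvLenOf kv.2 == M) with hlf
    set rf := r.filter (fun kv => pvLenOf kv.2 == M) with hrf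
    by_cases hlen : 1 < (lf ++ m :: rf).length
    · rw [if_pos hlen]
      unfold choose_first_orf
      rw [if_neg (by simp)]
      -- the minimal key K over the filtered list
      have hLne : (lf ++ m :: rf).map (fun kv => kv.1) ≠ [] := by simp
      have hsomeK : (PySem.List.min? ((lf ++ m :: rf).map (fun kv => kv.1)) (fun k => k)).isSome = true := by
        cases hmk : PySem.List.min? ((lf ++ m :: rf).map (fun kv => kv.1)) (fun k => k) with
        | none => exact absurd ((PySem.List.min?_eq_none_iff _ _).1 hmk) hLne
        | some v => rfl
      obtain ⟨K, hK⟩ := Option.isSome_iff_exists.1 hsomeK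
      rw [hK]
      have hKmin : ∀ y ∈ lf ++ m :: rf, K ≤ y.1 := by
        intro y hy
        exact PySem.List.min?_isMin hK _ (List.mem_map.2 ⟨y, hy, rfl⟩)
      have hKmem : ∃ w ∈ lf ++ m :: rf, w.1 = K := by
        obtain ⟨w, hw, hwe⟩ := List.mem_map.1 (PySem.List.min?_mem hK)
        exact ⟨w, hw, hwe⟩
      -- key m = K
      have hmK : m.1 = K := by
        obtain ⟨w, hw, hwK⟩ := hKmem
        have hwx : w ∈ x :: t ∧ pvLenOf w.2 = M := by
          rcases List.mem_append.1 hw with hw | hw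
          · have := List.mem_filter.1 (hlf ▸ hw)
            exact ⟨heq ▸ List.mem_append.2 (Or.inl this.1), by simpa using this.2⟩
          · rcases List.mem_cons.1 hw with rfl | hw
            · exact ⟨hmmem, hmM⟩
            · have := List.mem_filter.1 (hrf ▸ hw)
              exact ⟨heq ▸ List.mem_append.2 (Or.inr (List.mem_cons.2 (Or.inr this.1))), by simpa using this.2⟩
        have h1 := hmin w hwx.1
        have h2 := hKmin m (List.mem_append.2 (Or.inr (by simp)))
        simp only [pvLexlt] at h1
        have hlw : pvLenOf w.2 = pvLenOf m.2 := by rw [hwx.2, hmM]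
        omega
      -- lookup finds m
      have hskip : ∀ p ∈ lf, (K == p.1) = false := by
        intro p hp
        have hpl := List.mem_filter.1 (hlf ▸ hp)
        have hplt := hl p hpl.1
        have hpM : pvLenOf p.2 = M := by simpa using hpl.2
        simp only [pvLexlt] at hplt
        have : K < p.1 := by rw [← hmK]; omega
        simp only [beq_eq_false_iff_ne, ne_eq]
        omega
      show List.lookup K (lf ++ m :: rf) = some m.2
      rw [pvLookup_append K lf (m :: rf) hskip]
      simp [List.lookup, ← hmK]
    · rw [if_neg hlen]
      -- the filtered list has exactly one element, m
      have : lf = [] ∧ rf = [] := by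
        rcases lf with _ | ⟨a, lf'⟩
        · rcases rf with _ | ⟨b, rf'⟩
          · exact ⟨rfl, rfl⟩
          · exact absurd (by simp only [List.length_append, List.length_cons, List.length_nil]; omega) hlen
        · exact absurd (by simp only [List.length_append, List.length_cons]; omega) hlen
      rw [this.1, this.2]
      rfl

-- ===== VERDICT (by name: the statement is the Claim_ definition above) =====
theorem choose_longest_orf_spec : Claim_equal_choose_longest_orf := by
  intro orfs _ _
  unfold Spec_choose_longest_orf
  exact pv_ports_agree orfs
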